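-- pv_equiv track=rewrite | github.com/JacekwPL/Tetris-made-with-matrix---turtle | main.py | mleft
-- ===== SOURCE A (Python) =====
-- def mleft(plansza):
--     war = 1
--     for y in range(len(plansza) - 1, 0, -1):
--         for x in range(1, len(plansza[y]) - 1):
--             if plansza[y][x] != '#' and plansza[y][x] != '0' and plansza[y][x] != '8':
--                 if plansza[y][x - 1] == '#' or plansza[y][x - 1] == '8':
--                     war = 0
--     if war:
--         for y in range(len(plansza) - 1, 0, -1):
--             for x in range(1, len(plansza[y]) - 1):
--                 if plansza[y][x] != '#' and plansza[y][x] != '0' and plansza[y][x] != '8':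
--                     if plansza[y][x - 1] != '#' and plansza[y][x - 1] != '8':
--                         plansza[y][x - 1], plansza[y][x] = plansza[y][x], plansza[y][x - 1]
--     return plansza
-- ===== SOURCE B (Python) =====
-- def shift_row(row):
--     # Rebuild the row from its ORIGINAL contents: every maximal run of active
--     # interior cells is rotated one step left (the run's old left neighbour
--     # lands at the run's end).  Single left-to-right pass with a carry.
--     L = len(row)
--     if L < 2:
--         return row[:]
--     out = []
--     carry = None
--     for x in range(1, L - 1):
--         if row[x] not in ('#', '0', '8'):
--             out.append(row[x])
--             if carry is None:
--                 carry = row[x - 1]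
--         else:
--             out.append(row[x - 1] if carry is None else carry)
--             carry = None
--     out.append(row[L - 2] if carry is None else carry)
--     out.append(row[L - 1])
--     return out
--
--
-- def mleft(plansza):
--     # Replaces plansza's rows 1.. with freshly built lists (A swaps cells in
--     # place); the returned value is the same.
--     if any(row[x] not in ('#', '0', '8') and row[x - 1] in ('#', '8')
--            for row in plansza[1:]
--            for x in range(1, len(row) - 1)):
--         return plansza
--     plansza[1:] = [shift_row(row) for row in plansza[1:]]
--     return plansza
-- ===== Notes on version B (the rewrite author's own statement) =====
-- stated objective: alternative
-- what changed: B never swaps cells: it tests for a wall collision with one flat any() over the rows, and then rebuilds each row functionally from its original contents in a single carry-passing pass that rotates every maximal run of active cells one step left, replacing the rows via slice assignment instead of A's in-place adjacent-swap sweep over the mutating grid.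
import Mathlib
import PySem

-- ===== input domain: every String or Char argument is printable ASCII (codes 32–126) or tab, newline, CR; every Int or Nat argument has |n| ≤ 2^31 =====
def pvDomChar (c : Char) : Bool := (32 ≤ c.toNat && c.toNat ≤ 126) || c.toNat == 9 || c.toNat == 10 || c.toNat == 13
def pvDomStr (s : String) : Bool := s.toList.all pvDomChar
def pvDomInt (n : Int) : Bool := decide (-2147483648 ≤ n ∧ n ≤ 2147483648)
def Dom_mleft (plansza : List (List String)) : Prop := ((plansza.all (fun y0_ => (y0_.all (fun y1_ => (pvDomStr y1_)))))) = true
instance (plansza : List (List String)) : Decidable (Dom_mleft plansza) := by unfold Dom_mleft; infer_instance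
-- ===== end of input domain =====

-- B never swaps: it tests for a collision with one flat any() and rebuilds each row functionally
-- from its original contents in a single carry-passing pass (every maximal run of active cells is
-- rotated one step left), replacing the rows by slice assignment (objective: alternative).
-- A mutates the rows of `plansza` in place, B replaces the row objects; the equivalence proved
-- here is about the returned grid value.

-- ===== PORT A =====
-- tiny predicates: `plansza[y][x] != '#' and != '0' and != '8'` / `== '#' or == '8'`
def activeP (s : String) : Bool := !(s == "#") && !(s == "0") && !(s == "8")
def blockedP (s : String) : Bool := (s == "#") || (s == "8")
-- plansza[y][x]; every index used by either program is ≥ 0 and in range, so toNat/getD is exact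
def gg (g : List (List String)) (y x : Int) : String := (g.getD y.toNat []).getD x.toNat ""
-- the tuple assignment `plansza[y][x-1], plansza[y][x] = plansza[y][x], plansza[y][x-1]`:
-- both right-hand values are read first, then row y is updated at x-1 and at x
def rswap (r : List String) (x : Int) : List String :=
  (r.set (x - 1).toNat (r.getD x.toNat "")).set x.toNat (r.getD (x - 1).toNat "")
def gswap (g : List (List String)) (y x : Int) : List (List String) :=
  g.modify y.toNat (fun r => rswap r x)

def mleft (plansza : List (List String)) : List (List String) :=
  let war : Int :=
    (PySem.List.pyRange ((plansza.length : Int) - 1) 0 (-1)).foldl (fun war y =>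
      (PySem.List.pyRange 1 (((plansza.getD y.toNat []).length : Int) - 1)).foldl (fun war x =>
        if activeP (gg plansza y x) then
          if blockedP (gg plansza y (x - 1)) then 0 else war
        else war) war) 1
  if war ≠ 0 then
    (PySem.List.pyRange ((plansza.length : Int) - 1) 0 (-1)).foldl (fun g y =>
      (PySem.List.pyRange 1 (((g.getD y.toNat []).length : Int) - 1)).foldl (fun g x =>
        if activeP (gg g y x) then
          if !(blockedP (gg g y (x - 1))) then gswap g y x else g
        else g) g) plansza
  else plansza

-- ===== PORT B =====
-- the flat any(): `row[x] not in ('#','0','8') and row[x-1] in ('#','8')` over the interior of one row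
def collideRow (row : List String) : Bool :=
  (PySem.List.pyRange 1 ((row.length : Int) - 1)).any
    (fun x => activeP (row.getD x.toNat "") && blockedP (row.getD (x - 1).toNat ""))

-- body of shift_row's carry loop: state = (out, carry)
def bstep (row : List String) (s : List String × Option String) (x : Int) : List String × Option String :=
  if activeP (row.getD x.toNat "") then
    (s.1 ++ [row.getD x.toNat ""], some (s.2.getD (row.getD (x - 1).toNat "")))
  else
    (s.1 ++ [s.2.getD (row.getD (x - 1).toNat "")], none)

def shiftRow (row : List String) : List String :=
  if row.length < 2 then row
  else
    let st := (PySem.List.pyRange 1 ((row.length : Int) - 1)).foldl (bstep row) ([], none)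
    st.1 ++ [st.2.getD (row.getD (row.length - 2) "")] ++ [row.getD (row.length - 1) ""]

def mleft_alt (plansza : List (List String)) : List (List String) :=
  -- `plansza[1:]` = drop 1 (exact: the lower bound 1 is nonnegative)
  if (plansza.drop 1).any collideRow then plansza
  else plansza.take 1 ++ (plansza.drop 1).map shiftRow

-- ===== PRECONDITION & SPEC =====
def Spec_mleft (plansza : List (List String)) (out : List (List String)) : Prop := out = mleft_alt plansza
instance (plansza : List (List String)) (out : List (List String)) : Decidable (Spec_mleft plansza out) := by unfold Spec_mleft; infer_instance

-- ===== CLAIM (what is proved, stated in full; the proofs are below) =====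
def Claim_equal_mleft : Prop := ∀ (plansza : List (List String)), Dom_mleft plansza → Spec_mleft plansza (mleft plansza)

-- ===== LEMMAS AND PROOFS =====

-- getD through set/modify, and drop/last decompositions
theorem pv_getD_set_ne {α : Type} (l : List α) (i j : Nat) (v d : α) (h : i ≠ j) :
    (l.set i v).getD j d = l.getD j d := by
  simp [List.getD_eq_getElem?_getD, List.getElem?_set_ne h]

theorem pv_getD_set_self {α : Type} (l : List α) (i : Nat) (v d : α) (h : i < l.length) :
    (l.set i v).getD i d = v := by
  simp [List.getD_eq_getElem?_getD, h]

theorem pv_drop_cons {α : Type} (l : List α) (a : Nat) (d : α) (h : a < l.length) :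
    l.drop a = l.getD a d :: l.drop (a + 1) := by
  rw [List.drop_eq_getElem_cons h]
  simp [List.getD_eq_getElem?_getD, List.getElem?_eq_getElem h]

-- a fold that only ever overwrites the accumulator with 0 is an `any`
theorem pv_foldl_zero_any {α : Type} (l : List α) (p : α → Bool) (w : Int) :
    l.foldl (fun w x => if p x then 0 else w) w = if l.any p then 0 else w := by
  induction l generalizing w with
  | nil => simp
  | cons x xs ih => by_cases h : p x <;> simp [h, ih]

-- row-level step of A's second pass
def rstepA (r : List String) (x : Int) : List String :=
  if activeP (r.getD x.toNat "") then
    if !(blockedP (r.getD (x - 1).toNat "")) then rswap r x else r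
  else r

-- a grid fold whose step is `modify` of row y lifts to a row fold
theorem pv_foldl_modify_lift (y : Nat) (f : List String → Int → List String)
    (gstep : List (List String) → Int → List (List String))
    (h : ∀ g x, gstep g x = g.modify y (fun r => f r x)) :
    ∀ (xs : List Int) (g : List (List String)),
      xs.foldl gstep g = g.modify y (fun r => xs.foldl f r) := by
  intro xs
  induction xs with
  | nil => intro g; exact (List.modify_id y g).symm
  | cons x xs ih =>
    intro g
    simp only [List.foldl_cons, h, ih, List.modify_modify_eq]
    rfl

-- A's second-pass grid step is such a lift of rstepA
theorem pv_stepA_lift (y : Int) (g : List (List String)) (x : Int) :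
    (if activeP (gg g y x) then
       if !(blockedP (gg g y (x - 1))) then gswap g y x else g
     else g) = g.modify y.toNat (fun r => rstepA r x) := by
  by_cases hy : y.toNat < g.length
  · have hget : g[y.toNat]?.getD default = g.getD y.toNat [] := by
      simp [List.getD_eq_getElem?_getD]; rfl
    rw [List.modify_eq_set, hget]
    unfold rstepA gg gswap
    split_ifs with h1 h2
    · rw [List.modify_eq_set, hget]
    · exact (List.set_getElem_self hy ▸ by
        simp [List.getD_eq_getElem?_getD, List.getElem?_eq_getElem hy])
    · exact (List.set_getElem_self hy ▸ by
        simp [List.getD_eq_getElem?_getD, List.getElem?_eq_getElem hy])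
  · have hle : g.length ≤ y.toNat := Nat.le_of_not_lt hy
    have hrow : g.getD y.toNat [] = [] := by
      simp [List.getD_eq_getElem?_getD, List.getElem?_eq_none hle]
    rw [List.modify_eq_self hle]
    simp [gg, activeP, blockedP, gswap, List.modify_eq_self hle]

-- CORE ROW LEMMA 1: with every active cell of r unblocked on its left (Hwar), A's guarded
-- swap pass over a row equals the unconditional swap pass over the originally-active cells.
theorem pv_rowEquiv (r : List String) (b : Int) (hb : b ≤ (r.length : Int))
    (Hwar : ∀ x : Int, 1 ≤ x → x < b → activeP (r.getD x.toNat "") = true →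
      blockedP (r.getD (x - 1).toNat "") = false) :
    ∀ (k : Nat) (a : Int) (cur : List String), (b - a).toNat ≤ k → 1 ≤ a →
      cur.length = r.length →
      (∀ j : Int, a ≤ j → cur.getD j.toNat "" = r.getD j.toNat "") →
      (a < b → activeP (r.getD a.toNat "") = true →
        blockedP (cur.getD (a - 1).toNat "") = false) →
      (PySem.List.pyRange a b).foldl rstepA cur =
        (PySem.List.pyRange a b).foldl
          (fun c x => if activeP (r.getD x.toNat "") then rswap c x else c) cur := by
  intro k
  induction k with
  | zero =>
    intro a cur hk _ _ _ _
    rw [PySem.List.pyRange_one_eq_nil (by omega)]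
    rfl
  | succ k ih =>
    intro a cur hk ha hlen hinv hbl
    by_cases hab : a < b
    · rw [PySem.List.pyRange_one_cons hab]
      have hcura : cur.getD a.toNat "" = r.getD a.toNat "" := hinv a le_rfl
      simp only [List.foldl_cons]
      by_cases hact : activeP (r.getD a.toNat "") = true
      · -- both sides swap
        have hblf : blockedP (cur.getD (a - 1).toNat "") = false := hbl hab hact
        have hstep : rstepA cur a = rswap cur a := by
          unfold rstepA; rw [hcura, hact, hblf]; simp
        rw [hstep, if_pos hact]
        have halt : a.toNat < cur.length := by
          rw [hlen]; omega
        have hlen' : (rswap cur a).length = r.length := by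
          simp [rswap, hlen]
        have hinv' : ∀ j : Int, a + 1 ≤ j → (rswap cur a).getD j.toNat "" = r.getD j.toNat "" := by
          intro j hj
          unfold rswap
          rw [pv_getD_set_ne _ _ _ _ _ (by omega), pv_getD_set_ne _ _ _ _ _ (by omega)]
          exact hinv j (by omega)
        have hbl' : a + 1 < b → activeP (r.getD (a + 1).toNat "") = true →
            blockedP ((rswap cur a).getD (a + 1 - 1).toNat "") = false := by
          intro _ _
          have : (a + 1 - 1 : Int) = a := by ring
          rw [this]
          unfold rswap
          rw [pv_getD_set_self _ _ _ _ (by simpa using halt)]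
          exact hblf
        exact ih (a + 1) (rswap cur a) (by omega) (by omega) hlen' hinv' hbl'
      · -- neither side swaps
        have hstep : rstepA cur a = cur := by
          unfold rstepA
          rw [hcura, if_neg hact]
        rw [hstep, if_neg hact]
        have hbl' : a + 1 < b → activeP (r.getD (a + 1).toNat "") = true →
            blockedP (cur.getD (a + 1 - 1).toNat "") = false := by
          intro hb1 h1
          have he : (a + 1 - 1 : Int) = a := by ring
          rw [he, hcura]
          have := Hwar (a + 1) (by omega) hb1 h1
          rwa [he] at this
        exact ih (a + 1) cur (by omega) (by omega) hlen (fun j hj => hinv j (by omega)) hbl'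
    · rw [PySem.List.pyRange_one_eq_nil (by omega)]
      rfl

-- CORE ROW LEMMA 2: the unconditional swap pass equals B's carry rebuild, index by index.
-- Invariant: after processing 1..a-1 the grid row is  out ++ [pending] ++ untouched tail,
-- where (out, carry) is the state of B's fold and pending = carry if a run is open.
theorem pv_shift_aux (r : List String) (hL : 2 ≤ r.length) :
    ∀ (k : Nat) (a : Int) (out : List String) (carry : Option String),
      ((r.length : Int) - 1 - a).toNat ≤ k → 1 ≤ a → a ≤ (r.length : Int) - 1 →
      out.length = (a - 1).toNat →
      (PySem.List.pyRange a ((r.length : Int) - 1)).foldl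
          (fun c x => if activeP (r.getD x.toNat "") then rswap c x else c)
          (out ++ carry.getD (r.getD (a - 1).toNat "") :: r.drop a.toNat)
      = (let st := (PySem.List.pyRange a ((r.length : Int) - 1)).foldl (bstep r) (out, carry);
         st.1 ++ [st.2.getD (r.getD (r.length - 2) "")] ++ [r.getD (r.length - 1) ""]) := by
  intro k
  induction k with
  | zero =>
    intro a out carry hk ha hab hout
    have hae : a = (r.length : Int) - 1 := by omega
    rw [PySem.List.pyRange_one_eq_nil (by omega)]
    simp only [List.foldl_nil]
    have h1 : (a - 1).toNat = r.length - 2 := by omega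
    have h2 : a.toNat = r.length - 1 := by omega
    have h3 : r.drop (r.length - 1) = [r.getD (r.length - 1) ""] := by
      rw [pv_drop_cons r (r.length - 1) "" (by omega)]
      simp [List.drop_eq_nil_of_le (by omega : r.length ≤ r.length - 1 + 1)]
    rw [h1, h2, h3]
    simp
  | succ k ih =>
    intro a out carry hk ha hab hout
    by_cases hlt : a < (r.length : Int) - 1
    · rw [PySem.List.pyRange_one_cons hlt]
      simp only [List.foldl_cons]
      have hoa : out.length = a.toNat - 1 := by omega
      have haN : a.toNat < r.length := by omega
      have ha1N : a.toNat + 1 ≤ r.length := by omega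
      have hdrop : r.drop a.toNat = r.getD a.toNat "" :: r.drop (a.toNat + 1) :=
        pv_drop_cons r a.toNat "" haN
      set cv := carry.getD (r.getD (a - 1).toNat "") with hcv
      set ρ := r.getD a.toNat "" with hρ
      have hcur : out ++ cv :: r.drop a.toNat = out ++ cv :: ρ :: r.drop (a.toNat + 1) := by
        rw [hdrop]
      by_cases hact : activeP ρ = true
      · -- swap: the run extends; ρ moves left past the pending value
        have hswap :
            rswap (out ++ cv :: ρ :: r.drop (a.toNat + 1)) a
              = (out ++ [ρ]) ++ cv :: r.drop (a.toNat + 1) := by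
          unfold rswap
          have hga : (out ++ cv :: ρ :: r.drop (a.toNat + 1)).getD a.toNat "" = ρ := by
            rw [List.getD_eq_getElem?_getD, List.getElem?_append_right (by omega)]
            have : a.toNat - out.length = 1 := by omega
            rw [this]; rfl
          have hga1 : (out ++ cv :: ρ :: r.drop (a.toNat + 1)).getD (a - 1).toNat "" = cv := by
            rw [List.getD_eq_getElem?_getD, List.getElem?_append_right (by omega)]
            have : (a - 1).toNat - out.length = 0 := by omega
            rw [this]; rfl
          rw [hga, hga1]
          have hs1 : (out ++ cv :: ρ :: r.drop (a.toNat + 1)).set (a - 1).toNat ρ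
              = out ++ ρ :: ρ :: r.drop (a.toNat + 1) := by
            rw [List.set_append_right _ _ (by omega)]
            have : (a - 1).toNat - out.length = 0 := by omega
            rw [this]; rfl
          rw [hs1, List.set_append_right _ _ (by omega)]
          have : a.toNat - out.length = 1 := by omega
          rw [this]; simp
        rw [hcur, if_pos hact, hswap]
        have hb : bstep r (out, carry) a = (out ++ [ρ], some cv) := by
          unfold bstep
          rw [if_pos (by rw [← hρ]; exact hact)]
        rw [hb]
        have := ih (a + 1) (out ++ [ρ]) (some cv) (by omega) (by omega) (by omega)
          (by simp [hout]; omega)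
        simpa [show ((a:Int) + 1 - 1) = a by ring, show ((a:Int)+1).toNat = a.toNat + 1 by omega]
          using this
      · -- no swap: the pending value is committed, the run (if any) is closed
        have hb : bstep r (out, carry) a = (out ++ [cv], none) := by
          unfold bstep
          rw [if_neg (by rw [← hρ]; exact hact)]
        rw [hcur, if_neg hact, hb]
        have hre : out ++ cv :: ρ :: r.drop (a.toNat + 1)
            = (out ++ [cv]) ++ ρ :: r.drop (a.toNat + 1) := by simp
        rw [hre]
        have := ih (a + 1) (out ++ [cv]) none (by omega) (by omega) (by omega)
          (by simp [hout]; omega)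
        simpa [show ((a:Int) + 1 - 1) = a by ring, show ((a:Int)+1).toNat = a.toNat + 1 by omega,
          hρ] using this
    · rw [PySem.List.pyRange_one_eq_nil (by omega)]
      simp only [List.foldl_nil]
      have h1 : (a - 1).toNat = r.length - 2 := by omega
      have h2 : a.toNat = r.length - 1 := by omega
      have h3 : r.drop (r.length - 1) = [r.getD (r.length - 1) ""] := by
        rw [pv_drop_cons r (r.length - 1) "" (by omega)]
        simp [List.drop_eq_nil_of_le (by omega : r.length ≤ r.length - 1 + 1)]
      rw [h1, h2, h3]
      simp

theorem pv_swap_shift (r : List String) :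
    (PySem.List.pyRange 1 ((r.length : Int) - 1)).foldl
      (fun c x => if activeP (r.getD x.toNat "") then rswap c x else c) r = shiftRow r := by
  by_cases hL : r.length < 2
  · rw [PySem.List.pyRange_one_eq_nil (by omega), shiftRow, if_pos hL]
    rfl
  · have hL2 : 2 ≤ r.length := by omega
    have hinit : r = ([] : List String) ++
        (Option.none).getD (r.getD ((1 : Int) - 1).toNat "") :: r.drop (1 : Int).toNat := by
      simp only [List.nil_append, Option.getD_none]
      have := pv_drop_cons r 0 "" (by omega)
      simpa using this
    rw [shiftRow, if_neg hL]
    calc (PySem.List.pyRange 1 ((r.length : Int) - 1)).foldl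
          (fun c x => if activeP (r.getD x.toNat "") then rswap c x else c) r
        = (PySem.List.pyRange 1 ((r.length : Int) - 1)).foldl
          (fun c x => if activeP (r.getD x.toNat "") then rswap c x else c)
          ([] ++ (Option.none).getD (r.getD ((1 : Int) - 1).toNat "") :: r.drop (1 : Int).toNat) := by
          rw [← hinit]
      _ = _ := by
          rw [pv_shift_aux r hL2 ((r.length : Int) - 2).toNat 1 [] none
            (by omega) le_rfl (by omega) (by simp)]

-- B's condition per row equals A's, and any() over the countdown range is any() over the rows
theorem pv_modify_getD_self (g : List (List String)) (i : Nat)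
    (f : List String → List String → List String) :
    g.modify i (fun r => f (g.getD i []) r) = g.modify i (fun r => f r r) := by
  apply List.ext_getElem?
  intro j
  simp only [List.getElem?_modify]
  by_cases hij : i = j
  · subst hij
    cases h : g[i]? with
    | none => simp
    | some v => simp [List.getD_eq_getElem?_getD, h]
  · simp [hij]

theorem pv_map_getD {α : Type} (g : List α) (d : α) :
    ∀ (k a : Nat), g.length - a ≤ k →
      (PySem.List.pyRange (a : Int) (g.length : Int) 1).map (fun y => g.getD y.toNat d)
        = g.drop a := by
  intro k
  induction k with
  | zero =>
    intro a hk
    rw [PySem.List.pyRange_one_eq_nil (by omega), List.drop_eq_nil_of_le (by omega)]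
    rfl
  | succ k ih =>
    intro a hk
    by_cases hlt : a < g.length
    · rw [PySem.List.pyRange_one_cons (by exact_mod_cast hlt), List.map_cons]
      have h1 : ((a : Int) + 1) = ((a + 1 : Nat) : Int) := by push_cast; ring
      rw [h1, ih (a + 1) (by omega), pv_drop_cons g a d hlt]
      simp
    · rw [PySem.List.pyRange_one_eq_nil (by omega), List.drop_eq_nil_of_le (by omega)]
      rfl

theorem pv_any_rows (f : List String → Bool) (g : List (List String)) :
    (PySem.List.pyRange ((g.length : Int) - 1) 0 (-1)).any (fun y => f (g.getD y.toNat []))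
      = (g.drop 1).any f := by
  rw [PySem.List.pyRange_neg_one_eq_reverse]
  have h1 : ((g.length : Int) - 1 + 1) = (g.length : Int) := by ring
  rw [h1, List.any_reverse]
  have h2 : ((1 : Nat) : Int) = (1 : Int) := rfl
  rw [← h2, ← pv_map_getD g [] g.length 1 (by omega), List.any_map]
  rfl

-- pointwise description of a fold of row modifications at pairwise-distinct nonnegative indices
theorem pv_foldl_modify_getElem? (F : List String → List String) :
    ∀ (ys : List Int) (g : List (List String)) (j : Nat),
      ys.Pairwise (· ≠ ·) → (∀ y ∈ ys, 0 ≤ y) →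
      (ys.foldl (fun g y => g.modify y.toNat F) g)[j]? =
        if (j : Int) ∈ ys then g[j]?.map F else g[j]? := by
  intro ys
  induction ys with
  | nil => intro g j _ _; simp
  | cons y ys ih =>
    intro g j hpair hpos
    have hy0 : 0 ≤ y := hpos y (List.mem_cons_self ..)
    simp only [List.foldl_cons]
    rw [ih (g.modify y.toNat F) j hpair.of_cons (fun y' h => hpos y' (List.mem_cons_of_mem _ h))]
    by_cases hmem : (j : Int) ∈ ys
    · have hne : y.toNat ≠ j := by
        intro h
        have : y = (j : Int) := by omega
        exact (List.pairwise_cons.mp hpair).1 _ hmem (this ▸ rfl)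
      rw [if_pos hmem, if_pos (List.mem_cons_of_mem _ hmem), List.getElem?_modify]
      cases h : g[j]? with
      | none => simp
      | some v => simp [hne]
    · by_cases hjy : (j : Int) = y
      · have : y.toNat = j := by omega
        rw [if_neg hmem, if_pos (by rw [hjy]; exact List.mem_cons_self ..), List.getElem?_modify,
          this]
        cases h : g[j]? with
        | none => simp
        | some v => simp
      · have hne : y.toNat ≠ j := by omega
        rw [if_neg hmem, if_neg (by simp [hjy, hmem]), List.getElem?_modify]
        cases h : g[j]? with
        | none => simp
        | some v => simp [hne]

-- the collision test, per cell and per row (pvProw g y = collideRow of row y, definitionally)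
def pvPcell (plansza : List (List String)) (y x : Int) : Bool :=
  activeP (gg plansza y x) && blockedP (gg plansza y (x - 1))
def pvProw (plansza : List (List String)) (y : Int) : Bool :=
  (PySem.List.pyRange 1 (((plansza.getD y.toNat []).length : Int) - 1)).any (pvPcell plansza y)

-- A's whole per-row transformation (guards included)
def pvRF (r : List String) : List String :=
  (PySem.List.pyRange 1 ((r.length : Int) - 1)).foldl rstepA r

-- on a collision-free row, A's transformation is B's rebuild
theorem pv_RF_eq_shiftRow (r : List String) (hr : collideRow r = false) :
    pvRF r = shiftRow r := by
  have Hwar : ∀ x : Int, 1 ≤ x → x < (r.length : Int) - 1 →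
      activeP (r.getD x.toNat "") = true → blockedP (r.getD (x - 1).toNat "") = false := by
    intro x h1 h2 hact
    unfold collideRow at hr
    rw [List.any_eq_false] at hr
    have h' := hr x (PySem.List.mem_pyRange_one.mpr ⟨h1, h2⟩)
    by_cases hb : blockedP (r.getD (x - 1).toNat "") = true
    · exact absurd (by rw [hact, hb]; rfl) h'
    · simpa using hb
  unfold pvRF
  rw [pv_rowEquiv r ((r.length : Int) - 1) (by omega) Hwar
    ((r.length : Int) - 2).toNat 1 r (by omega) le_rfl rfl (fun j _ => rfl)
    (fun h1 hact => by simpa using Hwar 1 le_rfl h1 (by simpa using hact))]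
  exact pv_swap_shift r

-- ===== VERDICT (by name: the statement is the Claim_ definition above) =====
theorem mleft_spec : Claim_equal_mleft := by
  intro plansza _
  unfold Spec_mleft
  simp only [mleft, mleft_alt]
  -- 1. A's first pass computes `if any collision then 0 else 1`
  have h1 : ∀ y : Int,
      (fun (war : Int) (x : Int) =>
        if activeP (gg plansza y x) then
          if blockedP (gg plansza y (x - 1)) then (0 : Int) else war
        else war) = (fun (w : Int) (x : Int) => if pvPcell plansza y x then 0 else w) := by
    intro y; funext w x
    unfold pvPcell
    by_cases ha : activeP (gg plansza y x) <;>
      by_cases hb : blockedP (gg plansza y (x - 1)) <;> simp [ha, hb]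
  have h2 : (fun (war : Int) (y : Int) =>
      (PySem.List.pyRange 1 (((plansza.getD y.toNat []).length : Int) - 1)).foldl
        (fun war x =>
          if activeP (gg plansza y x) then
            if blockedP (gg plansza y (x - 1)) then (0 : Int) else war
          else war) war) = (fun (w : Int) (y : Int) => if pvProw plansza y then 0 else w) := by
    funext w y
    rw [h1 y, pv_foldl_zero_any]
    rfl
  rw [h2, pv_foldl_zero_any]
  -- 2. the two collision tests agree
  have hAny : (PySem.List.pyRange ((plansza.length : Int) - 1) 0 (-1)).any (pvProw plansza)
      = (plansza.drop 1).any collideRow := by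
    have : pvProw plansza = fun y => collideRow (plansza.getD y.toNat []) := by
      funext y; rfl
    rw [this, pv_any_rows]
  rw [hAny]
  by_cases hc : (plansza.drop 1).any collideRow = true
  · rw [hc]; simp
  · rw [Bool.not_eq_true] at hc
    rw [hc]
    rw [show (if (false = true) then (0:Int) else 1) = 1 by simp,
        if_pos (by norm_num : (1:Int) ≠ 0), if_neg (by simp)]
    -- 3. A's second pass is a fold of per-row modifications by pvRF
    have hA2 : (fun (g : List (List String)) (y : Int) =>
        (PySem.List.pyRange 1 (((g.getD y.toNat []).length : Int) - 1)).foldl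
          (fun g x =>
            if activeP (gg g y x) then
              if !(blockedP (gg g y (x - 1))) then gswap g y x else g
            else g) g)
        = (fun (g : List (List String)) (y : Int) => g.modify y.toNat pvRF) := by
      funext g y
      rw [pv_foldl_modify_lift y.toNat rstepA _ (fun g x => pv_stepA_lift y g x) _ g]
      have := pv_modify_getD_self g y.toNat
        (fun row r => (PySem.List.pyRange 1 ((row.length : Int) - 1)).foldl rstepA r)
      simpa [pvRF] using this
    rw [hA2]
    -- 4. compare both sides index by index
    apply List.ext_getElem?
    intro j
    have hpair : (PySem.List.pyRange ((plansza.length : Int) - 1) 0 (-1)).Pairwise (· ≠ ·) := by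
      rw [PySem.List.pyRange_neg_one_eq_reverse]
      refine (List.pairwise_reverse.mpr ?_)
      exact (PySem.List.pairwise_lt_pyRange_one _ _).imp (fun h => by omega)
    have hpos : ∀ y ∈ PySem.List.pyRange ((plansza.length : Int) - 1) 0 (-1), 0 ≤ y := by
      intro y hy
      have := PySem.List.mem_pyRange_neg_one.mp hy
      omega
    rw [pv_foldl_modify_getElem? pvRF _ plansza j hpair hpos]
    have hmem : ((j : Int) ∈ PySem.List.pyRange ((plansza.length : Int) - 1) 0 (-1))
        ↔ (1 ≤ j ∧ j < plansza.length) := by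
      rw [PySem.List.mem_pyRange_neg_one]
      omega
    by_cases hj : 1 ≤ j ∧ j < plansza.length
    · rw [if_pos (hmem.mpr hj)]
      -- RHS at index j ≥ 1: the mapped rebuilt row
      have htake : (plansza.take 1).length = 1 := by
        simp; omega
      rw [List.getElem?_append_right (by omega : (plansza.take 1).length ≤ j)]
      rw [htake, List.getElem?_map, List.getElem?_drop]
      have hjj : 1 + (j - 1) = j := by omega
      rw [hjj]
      -- the row at j is collision-free
      cases hrow : plansza[j]? with
      | none => simp
      | some r =>
        have hmem' : r ∈ plansza.drop 1 := by
          have : (plansza.drop 1)[j - 1]? = some r := by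
            rw [List.getElem?_drop, hjj]; exact hrow
          exact List.mem_of_getElem? this
        have hcf : collideRow r = false := by
          rw [List.any_eq_false] at hc
          simpa using hc r hmem'
        simp [pv_RF_eq_shiftRow r hcf]
    · rw [if_neg (fun h => hj (hmem.mp h))]
      by_cases hj0 : j = 0
      · subst hj0
        cases hn : plansza with
        | nil => simp
        | cons r tl => simp
      · -- j ≥ length: both sides none
        have hge : plansza.length ≤ j := by omega
        rw [List.getElem?_eq_none hge, List.getElem?_eq_none (by simp; omega)]
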